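-- pv_equiv track=rewrite | github.com/taherhasan2001/1st-AI-project-python | runme.py | getdub
-- ===== SOURCE A (Python) =====
-- def getdub(ls):
--     lsSameP = []
--     i = 0
--     while (i < len(ls) - 1):
--         j = i + 1
--         while (j < len(ls)):
--             if (ls[i][14:] == ls[j][14:]):
--                 lsSameP.append(j)
--             j += 1
--         i += 1
--     return lsSameP
-- ===== SOURCE B (Python) =====
-- def getdub(ls):
--     # Bucket indices by their suffix once, then emit later same-bucket indices per i.
--     pairs = [(s[14:], i) for i, s in enumerate(ls)]
--     buckets = {}
--     for key, i in pairs: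
--         buckets.setdefault(key, []).append(i)
--     out = []
--     for key, i in pairs:
--         for j in buckets[key]:
--             if j > i:
--                 out.append(j)
--     return out
-- ===== Notes on version B (the rewrite author's own statement) =====
-- stated objective: faster
-- what changed: A compares the [14:] suffixes of every pair of strings in two nested loops; B computes each suffix once, buckets the indices by suffix in a dict in one pass, and then emits, for each index i, the later indices in i's bucket.
import Mathlib
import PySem

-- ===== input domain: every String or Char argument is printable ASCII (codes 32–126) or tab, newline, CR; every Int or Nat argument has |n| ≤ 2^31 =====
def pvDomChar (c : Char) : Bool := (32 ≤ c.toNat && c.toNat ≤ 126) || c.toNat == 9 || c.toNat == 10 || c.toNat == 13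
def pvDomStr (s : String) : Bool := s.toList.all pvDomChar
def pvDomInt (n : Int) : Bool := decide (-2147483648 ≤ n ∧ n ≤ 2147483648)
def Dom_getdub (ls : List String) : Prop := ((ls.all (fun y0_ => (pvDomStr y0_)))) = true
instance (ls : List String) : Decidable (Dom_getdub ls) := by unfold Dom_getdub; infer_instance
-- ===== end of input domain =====

-- B replaces A's all-pairs suffix comparison by one dict bucketing indices per suffix, then emits later same-bucket indices per i (objective: faster).


-- shared helper: s[14:]
def pvSuff (s : String) : List Char := PySem.List.slice s.toList (some 14) none

-- ===== PORT A =====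
-- inner while loop: j runs from its start up to len(ls); appends j when the two suffixes match
def getdubInner (ls : List String) (i j : Nat) (acc : List Int) : List Int :=
  if j < ls.length then
    getdubInner ls i (j + 1)
      (if pvSuff (ls.getD i "") == pvSuff (ls.getD j "") then acc ++ [(j : Int)] else acc)
  else acc
termination_by ls.length - j

-- outer while loop: Python's 'i < len(ls) - 1' is 'i + 1 < len(ls)' (also when len = 0)
def getdubOuter (ls : List String) (i : Nat) (acc : List Int) : List Int :=
  if i + 1 < ls.length then getdubOuter ls (i + 1) (getdubInner ls i (i + 1) acc) else acc
termination_by ls.length - i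

def getdub (ls : List String) : List Int := getdubOuter ls 0 []

-- ===== PORT B =====
def getdub_alt (ls : List String) : List Int :=
  let pairs : List (List Char × Int) :=
    (PySem.List.enumerate ls 0).map (fun p => (pvSuff p.2, p.1))
  let buckets : PySem.Dict (List Char) (List Int) :=
    pairs.foldl (fun d p => d.modify p.1 [] (· ++ [p.2])) PySem.Dict.empty
  pairs.foldl (fun out p =>
    (buckets.getD p.1 []).foldl (fun out j => if p.2 < j then out ++ [j] else out) out) []

-- ===== PRECONDITION & SPEC =====
def Spec_getdub (ls : List String) (out : List Int) : Prop := out = getdub_alt ls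
instance (ls : List String) (out : List Int) : Decidable (Spec_getdub ls out) := by unfold Spec_getdub; infer_instance

-- ===== CLAIM (what is proved, stated in full; the proofs are below) =====
def Claim_equal_getdub : Prop := ∀ (ls : List String), Dom_getdub ls → Spec_getdub ls (getdub ls)

-- ===== LEMMAS AND PROOFS =====

-- common normal form: for index i, the later indices whose suffix matches suffix i
def pvHits (ls : List String) (i : Nat) : List Int :=
  ((List.range ls.length).filter
      (fun t => (pvSuff (ls.getD t "") == pvSuff (ls.getD i "")) && decide (i < t))).map
    (fun t : Nat => (t : Int))

theorem inner_eq (ls : List String) (i : Nat) :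
    ∀ j acc, getdubInner ls i j acc =
      acc ++ ((List.range' j (ls.length - j)).filter
        (fun k => pvSuff (ls.getD k "") == pvSuff (ls.getD i ""))).map
          (fun k : Nat => (k : Int)) := by
  intro j
  induction hfuel : ls.length - j generalizing j with
  | zero =>
    intro acc
    rw [getdubInner]
    simp [show ¬ j < ls.length by omega]
  | succ m ih =>
    intro acc
    rw [getdubInner]
    have hj : j < ls.length := by omega
    rw [if_pos hj, ih (j + 1) (by omega), List.range'_succ]
    by_cases h : pvSuff (ls.getD i "") = pvSuff (ls.getD j "")
    · simp [List.getD] at h ⊢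
      simp [h]
    · simp only [List.getD] at h
      have h' : ¬ (pvSuff (ls[j]?.getD "") = pvSuff (ls[i]?.getD "")) := fun hh => h hh.symm
      simp [List.getD, h, h']

theorem filter_range_lt (n i : Nat) :
    (List.range n).filter (fun k => decide (i < k)) = List.range' (i + 1) (n - (i + 1)) := by
  induction n with
  | zero => simp
  | succ m ih =>
    rw [List.range_succ, List.filter_append, ih]
    by_cases h : i < m
    · simp only [List.filter_cons, List.filter_nil, h, decide_true, if_true]
      rw [show m + 1 - (i + 1) = (m - (i + 1)) + 1 by omega, List.range'_concat]
      simp; omega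
    · simp [h, show m + 1 - (i + 1) = m - (i + 1) by omega]

theorem hits_eq (ls : List String) (i : Nat) :
    (List.range' (i + 1) (ls.length - (i + 1))).filter
        (fun t => pvSuff (ls.getD t "") == pvSuff (ls.getD i "")) =
      (List.range ls.length).filter
        (fun t => (pvSuff (ls.getD t "") == pvSuff (ls.getD i "")) && decide (i < t)) := by
  rw [← filter_range_lt ls.length i, ← List.filter_filter]

theorem outer_eq (ls : List String) :
    ∀ i acc, getdubOuter ls i acc =
      acc ++ (List.range' i (ls.length - 1 - i)).flatMap (fun k => pvHits ls k) := by
  intro i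
  induction hfuel : ls.length - 1 - i generalizing i with
  | zero =>
    intro acc
    rw [getdubOuter]
    simp [show ¬ i + 1 < ls.length by omega]
  | succ m ih =>
    intro acc
    rw [getdubOuter]
    have hi : i + 1 < ls.length := by omega
    rw [if_pos hi, ih (i + 1) (by omega), inner_eq, List.range'_succ, List.flatMap_cons,
        hits_eq]
    simp [pvHits]

theorem getdub_eq_flatMap (ls : List String) :
    getdub ls = (List.range (ls.length - 1)).flatMap (fun k => pvHits ls k) := by
  rw [getdub, outer_eq]
  simp [List.range_eq_range']

-- pyRange 0 n 1 is the casted List.range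
theorem pyRange_zero_eq_map (n : Nat) :
    PySem.List.pyRange 0 (n : Int) 1 = List.map (fun k : Nat => (k : Int)) (List.range n) := by
  rw [PySem.List.pyRange_zero_natCast, List.map_eq_flatMap]

-- B-side: the `pairs` list is a map over range
theorem pairs_eq (ls : List String) :
    (PySem.List.enumerate ls 0).map (fun p => (pvSuff p.2, p.1)) =
      (List.range ls.length).map (fun k : Nat => (pvSuff (ls.getD k ""), (k : Int))) := by
  rw [PySem.List.enumerate_eq_map_pyRange (d := ""),
      show PySem.List.len ls = ((ls.length : Nat) : Int) from rfl, pyRange_zero_eq_map]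
  simp [PySem.List.pyGetD_natCast, List.getD, Function.comp_def]

-- B-side: per-index contribution read off the bucket equals pvHits
theorem contrib_eq (ls : List String) (k : Nat) :
    ((((List.range ls.length).map (fun t : Nat => (pvSuff (ls.getD t ""), (t : Int)))).filter
        (fun q => q.1 == pvSuff (ls.getD k ""))).map (fun q => q.2)).filter
      (fun j => decide ((k : Int) < j)) = pvHits ls k := by
  rw [pvHits, List.filter_map, List.filter_filter, List.filter_map, List.map_map]
  rw [show ((fun q : List Char × Int => q.2) ∘ fun t : Nat => (pvSuff (ls.getD t ""), (t : Int)))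
        = (fun t : Nat => (t : Int)) from rfl]
  exact congrArg _ (List.filter_congr fun a _ => by simp [Bool.and_comm])

theorem alt_eq_flatMap (ls : List String) :
    getdub_alt ls = (List.range ls.length).flatMap (fun i => pvHits ls i) := by
  rw [getdub_alt]
  simp only [pairs_eq]
  set pr := (List.range ls.length).map (fun k : Nat => (pvSuff (ls.getD k ""), (k : Int))) with hpr
  set bk := pr.foldl (fun d p => d.modify p.1 [] (· ++ [p.2])) PySem.Dict.empty with hbk
  have hstep : pr.foldl (fun (out : List Int) p =>
        (bk.getD p.1 []).foldl (fun out j => if p.2 < j then out ++ [j] else out) out) []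
      = pr.foldl (fun out p =>
          out ++ ((pr.filter (fun q => q.1 == p.1)).map (fun q => q.2)).filter
            (fun j => decide (p.2 < j))) [] := by
    apply PySem.List.foldl_congr_mem
    intro out p _
    rw [hbk, PySem.Dict.getD_foldl_modify_append,
        PySem.List.foldl_append_ite_eq_filter (p := fun j => p.2 < j)]
    simp
  rw [hstep, PySem.List.foldl_append_eq_flatMap, List.nil_append, hpr, List.flatMap_map]
  exact List.flatMap_congr fun k _ => contrib_eq ls k

theorem last_hits_nil (ls : List String) (h : 0 < ls.length) : pvHits ls (ls.length - 1) = [] := by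
  rw [pvHits, List.filter_eq_nil_iff.mpr, List.map_nil]
  intro t ht
  have := List.mem_range.mp ht
  simp [show ¬ (ls.length - 1 < t) by omega]

theorem getdub_spec' (ls : List String) : getdub ls = getdub_alt ls := by
  rw [getdub_eq_flatMap, alt_eq_flatMap]
  rcases Nat.eq_zero_or_pos ls.length with h | h
  · simp [h]
  · conv_rhs => rw [show ls.length = (ls.length - 1) + 1 by omega, List.range_succ]
    rw [List.flatMap_append, List.flatMap_singleton, last_hits_nil ls h]
    simp

-- ===== VERDICT (by name: the statement is the Claim_ definition above) =====
theorem getdub_spec : Claim_equal_getdub := by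
  intro ls _
  unfold Spec_getdub
  exact getdub_spec' ls
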